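-- pv_equiv track=rewrite | github.com/not-mBRS/samsa-engine | NOP_injector.py | get_slack_space
-- ===== SOURCE A (Python) =====
-- def get_slack_space(section_data):
--     zero_count = 0
--     for byte in reversed(section_data):
--         if byte == 0x00:
--             zero_count += 1
--         else:
--             break
--     return zero_count
-- ===== SOURCE B (Python) =====
-- def get_slack_space(section_data):
--     last = -1
--     for i, byte in enumerate(section_data):
--         if byte != 0x00:
--             last = i
--     return len(section_data) - (last + 1)
-- ===== Notes on version B (the rewrite author's own statement) =====
-- stated objective: alternative
-- what changed: Replaced the reverse scan with an early break by a single forward enumerate pass that tracks the index of the last non-zero byte and returns len - (last+1).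
import Mathlib
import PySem

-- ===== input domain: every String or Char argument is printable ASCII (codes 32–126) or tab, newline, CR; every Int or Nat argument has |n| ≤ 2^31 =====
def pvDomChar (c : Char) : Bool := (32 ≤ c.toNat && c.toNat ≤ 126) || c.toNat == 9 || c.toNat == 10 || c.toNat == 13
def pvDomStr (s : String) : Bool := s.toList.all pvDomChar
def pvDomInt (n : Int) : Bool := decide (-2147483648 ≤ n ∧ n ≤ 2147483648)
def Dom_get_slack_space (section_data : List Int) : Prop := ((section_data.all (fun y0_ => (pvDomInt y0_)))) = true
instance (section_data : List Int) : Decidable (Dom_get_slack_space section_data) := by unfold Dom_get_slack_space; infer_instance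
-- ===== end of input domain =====

-- B replaces A's reverse scan with an early break by one forward pass tracking the last non-zero index (alternative decomposition, same cost).


-- ===== PORT A =====
-- the 'for byte in reversed(section_data): if byte == 0 then count else break' loop
def pvLoopA : Int → List Int → Int
  | zero_count, [] => zero_count
  | zero_count, b :: rest => if b = 0 then pvLoopA (zero_count + 1) rest else zero_count

def get_slack_space (section_data : List Int) : Int :=
  pvLoopA 0 section_data.reverse

-- ===== PORT B =====
def get_slack_space_alt (section_data : List Int) : Int :=
  let last := (PySem.List.enumerate section_data 0).foldl
    (fun last p => if p.2 ≠ 0 then p.1 else last) (-1)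
  PySem.List.len section_data - (last + 1)

-- ===== PRECONDITION & SPEC =====
def Spec_get_slack_space (section_data : List Int) (out : Int) : Prop := out = get_slack_space_alt section_data
instance (section_data : List Int) (out : Int) : Decidable (Spec_get_slack_space section_data out) := by unfold Spec_get_slack_space; infer_instance

-- ===== CLAIM (what is proved, stated in full; the proofs are below) =====
def Claim_equal_get_slack_space : Prop := ∀ (section_data : List Int), Dom_get_slack_space section_data → Spec_get_slack_space section_data (get_slack_space section_data)

-- ===== LEMMAS AND PROOFS =====
theorem pvLoopA_acc (r : List Int) (acc : Int) : pvLoopA acc r = acc + pvLoopA 0 r := by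
  induction r generalizing acc with
  | nil => simp [pvLoopA]
  | cons b rest ih =>
    by_cases hb : b = 0
    · simp [pvLoopA, hb, ih (acc + 1), ih 1]; ring
    · simp [pvLoopA, hb]

theorem pv_main (xs : List Int) :
    pvLoopA 0 xs.reverse =
      (xs.length : Int) -
        ((PySem.List.enumerate xs 0).foldl (fun last p => if p.2 ≠ 0 then p.1 else last) (-1) + 1) := by
  induction xs using List.reverseRecOn with
  | nil => simp [pvLoopA, PySem.List.enumerate]
  | append_singleton xs b ih =>
    rw [List.reverse_append, PySem.List.enumerate_append]
    simp only [List.reverse_singleton, List.singleton_append, List.foldl_append,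
      PySem.List.enumerate_cons, PySem.List.enumerate_nil, List.foldl_cons, List.foldl_nil]
    by_cases hb : b = 0
    · rw [pvLoopA]
      simp only [hb, ne_eq, not_true_eq_false, if_false]
      rw [pvLoopA_acc, ih]
      simp
      ring
    · rw [pvLoopA]
      simp only [hb, ne_eq, not_false_eq_true, if_true]
      simp

-- ===== VERDICT (by name: the statement is the Claim_ definition above) =====
theorem get_slack_space_spec : Claim_equal_get_slack_space := by
  intro xs _
  unfold Spec_get_slack_space get_slack_space get_slack_space_alt
  simp only [PySem.List.len_eq]
  exact pv_main xs
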